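-- pv_equiv track=rewrite | github.com/WuTheFWasThat/plotserver | utils.py | matchespattern
-- ===== SOURCE A (Python) =====
-- def normalize_url_or_pattern(url):
--     if url.startswith('az://'):
--         _, _, container, rest = url.split('/', 3)
--         url = f'https://{container}.blob.core.windows.net/{rest}'
--     return url
--
-- def matchespattern(pattern, url):
--     pattern = normalize_url_or_pattern(pattern)
--     url = normalize_url_or_pattern(url)
--     pattern_parts = pattern.split("/")
--     url_parts = url.split("/")
--     if len(pattern_parts) != len(url_parts):
--         return False, None
--     wildcard_parts = []
--     for pat_part, url_part in zip(pattern_parts, url_parts):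
--         if pat_part == "*":
--             wildcard_parts.append(url_part)
--             continue
--         elif pat_part != url_part:
--             return False, None
--     return True, wildcard_parts
-- ===== SOURCE B (Python) =====
-- def normalize_url_or_pattern(url):
--     if url.startswith('az://'):
--         _, _, container, rest = url.split('/', 3)
--         url = f'https://{container}.blob.core.windows.net/{rest}'
--     return url
--
-- def matchespattern(pattern, url):
--     # Streaming scan: peel one '/'-segment at a time from both strings at once,
--     # never materializing the split lists or comparing lengths up front.
--     pat = normalize_url_or_pattern(pattern)
--     u = normalize_url_or_pattern(url)
--     acc = []
--     while True:
--         i = pat.find('/')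
--         j = u.find('/')
--         pseg = pat if i < 0 else pat[:i]
--         useg = u if j < 0 else u[:j]
--         if pseg == '*':
--             acc.append(useg)
--         elif pseg != useg:
--             return False, None
--         if i < 0 and j < 0:
--             return True, acc
--         if i < 0 or j < 0:
--             return False, None
--         pat = pat[i + 1:]
--         u = u[j + 1:]
-- ===== Notes on version B (the rewrite author's own statement) =====
-- stated objective: alternative
-- what changed: Replaces split-both-strings + length check + zip loop by a single streaming scan that peels one '/'-delimited segment at a time from both strings simultaneously (find + slice), never materializing the split lists or comparing lengths up front.
import Mathlib
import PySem

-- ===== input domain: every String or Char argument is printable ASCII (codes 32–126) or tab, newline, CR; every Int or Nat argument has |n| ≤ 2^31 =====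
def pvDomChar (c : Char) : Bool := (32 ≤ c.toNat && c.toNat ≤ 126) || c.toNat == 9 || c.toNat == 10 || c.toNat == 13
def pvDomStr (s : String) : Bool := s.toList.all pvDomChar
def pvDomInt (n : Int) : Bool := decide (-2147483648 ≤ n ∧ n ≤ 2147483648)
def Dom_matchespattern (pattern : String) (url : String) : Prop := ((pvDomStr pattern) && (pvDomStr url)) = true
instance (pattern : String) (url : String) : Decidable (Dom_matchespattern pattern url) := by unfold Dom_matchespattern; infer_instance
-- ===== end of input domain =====

-- B replaces split-both + length check + zip loop by one streaming scan peeling a '/'-segment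
-- from both strings at a time (an 'alternative' decomposition, not claimed faster).

-- ===== PORT A =====
-- normalize_url_or_pattern: shared helper of both Pythons; 'none' = the ValueError of the
-- 4-way unpacking of url.split('/', 3) (excluded by Pre_).
def pvNormalize? (url : String) : Option String :=
  if PySem.Str.startswith url "az://" then
    match PySem.Str.splitMax? url "/" 3 with
    | some [_, _, container, rest] =>
        some ("https://" ++ container ++ ".blob.core.windows.net/" ++ rest)
    | _ => none
  else some url

-- the for-loop over zip(pattern_parts, url_parts) with its early return
def pvLoopA : List (List Char × List Char) → List String → Bool × Option (List String)
  | [], acc => (true, some acc)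
  | (p, u) :: rest, acc =>
      if p = ['*'] then pvLoopA rest (acc ++ [String.mk u])
      else if p ≠ u then (false, none)
      else pvLoopA rest acc

def matchespattern (pattern : String) (url : String) : Bool × Option (List String) :=
  match pvNormalize? pattern, pvNormalize? url with
  | some p, some u =>
      let pp := PySem.Chars.splitOn p.toList ['/']
      let up := PySem.Chars.splitOn u.toList ['/']
      if pp.length ≠ up.length then (false, none)
      else pvLoopA (pp.zip up) []
  | _, _ => (false, none)   -- unreachable under Pre_ (Python raises ValueError)

-- ===== PORT B =====
-- the while-True loop of Source B: state (pat, u, acc), one '/'-segment peeled per iteration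
def pvWalkB (pat : List Char) (u : List Char) (acc : List String) :
    Bool × Option (List String) :=
  let i := PySem.Chars.find pat ['/']
  let j := PySem.Chars.find u ['/']
  let pseg := if i < 0 then pat else PySem.List.slice pat none (some i)
  let useg := if j < 0 then u else PySem.List.slice u none (some j)
  let acc' := if pseg = ['*'] then acc ++ [String.mk useg] else acc
  if pseg ≠ ['*'] ∧ pseg ≠ useg then (false, none)
  else if i < 0 ∧ j < 0 then (true, some acc')
  else if i < 0 ∨ j < 0 then (false, none)
  else pvWalkB (PySem.List.slice pat (some (i + 1)) none)
               (PySem.List.slice u (some (j + 1)) none) acc'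
termination_by pat.length
decreasing_by
  · rename_i h1 h2 h3
    push_neg at h3
    have hi : (0:Int) ≤ PySem.Chars.find pat ['/'] := h3.1
    have hinf : ['/'] <:+: pat := (PySem.Chars.find_nonneg_iff pat ['/']).mp hi
    have hne : pat ≠ [] := by
      rintro rfl
      exact absurd (List.eq_nil_of_infix_nil hinf) (by simp)
    rw [PySem.List.slice_from _ (by omega)]
    have : 1 ≤ (PySem.Chars.find pat ['/'] + 1).toNat := by omega
    simp only [List.length_drop]
    have hlen : 0 < pat.length := List.length_pos_iff.mpr hne
    omega

def matchespattern_alt (pattern : String) (url : String) : Bool × Option (List String) :=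
  match pvNormalize? pattern, pvNormalize? url with
  | some p, some u => pvWalkB p.toList u.toList []
  | _, _ => (false, none)   -- unreachable under Pre_ (Python raises ValueError)

-- ===== PRECONDITION & SPEC =====
-- Pre_ excludes exactly the inputs where normalize_url_or_pattern raises ValueError in both
-- Pythons: an argument starting with 'az://' but containing fewer than three '/' characters,
-- on which the 4-way unpacking of url.split('/', 3) fails.
def Pre_matchespattern (pattern : String) (url : String) : Prop :=
  (PySem.Str.startswith pattern "az://" = true → 3 ≤ PySem.Str.count pattern "/") ∧
  (PySem.Str.startswith url "az://" = true → 3 ≤ PySem.Str.count url "/")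
instance (pattern : String) (url : String) : Decidable (Pre_matchespattern pattern url) := by
  unfold Pre_matchespattern; infer_instance

def pvWitness_matchespattern : String × String := ("az://c/a/*", "az://c/a/b")

def Spec_matchespattern (pattern : String) (url : String) (out : Bool × Option (List String)) : Prop :=
  out = matchespattern_alt pattern url
instance (pattern : String) (url : String) (out : Bool × Option (List String)) :
    Decidable (Spec_matchespattern pattern url out) := by unfold Spec_matchespattern; infer_instance

-- ===== CLAIM (what is proved, stated in full; the proofs are below) =====
def Claim_equal_matchespattern : Prop := ∀ (pattern : String) (url : String),
  Dom_matchespattern pattern url → Pre_matchespattern pattern url →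
  Spec_matchespattern pattern url (matchespattern pattern url)

-- ===== LEMMAS AND PROOFS =====

-- reference splitter: Python's s.split('/') on code points
def pvSplit : List Char → List (List Char)
  | [] => [[]]
  | c :: t => if c = '/' then [] :: pvSplit t else (pvSplit t).modifyHead (c :: ·)

theorem pvSplit_ne_nil (l : List Char) : pvSplit l ≠ [] := by
  induction l with
  | nil => simp [pvSplit]
  | cons c t ih =>
    simp only [pvSplit]
    split
    · simp
    · obtain ⟨x, xs, hx⟩ := List.exists_cons_of_ne_nil ih
      simp [hx, List.modifyHead]

theorem pvSplitOn_go (fuel : Nat) (l cur : List Char) (acc : List (List Char))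
    (h : l.length < fuel) :
    PySem.Chars.splitOn.go ['/'] fuel l cur acc
      = acc.reverse ++ (pvSplit l).modifyHead (cur.reverse ++ ·) := by
  induction fuel generalizing l cur acc with
  | zero => omega
  | succ f ih =>
    cases l with
    | nil =>
      rw [PySem.Chars.splitOn.go.eq_def]
      obtain ⟨x, xs, hx⟩ := List.exists_cons_of_ne_nil (pvSplit_ne_nil ([] : List Char))
      simp [pvSplit]
    | cons c t =>
      rw [PySem.Chars.splitOn.go.eq_def]
      by_cases hc : c = '/'
      · subst hc
        have hpre : List.isPrefixOf ['/'] ('/' :: t) = true := by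
          simp [List.isPrefixOf]
        simp only [hpre, if_true, List.drop_succ_cons, List.drop_zero, List.length_singleton]
        rw [ih t [] (cur.reverse :: acc) (by simpa using h),
            show pvSplit ('/' :: t) = [] :: pvSplit t from by simp [pvSplit]]
        obtain ⟨x, xs, hx⟩ := List.exists_cons_of_ne_nil (pvSplit_ne_nil t)
        rw [hx]
        simp [List.modifyHead]
      · have hpre : List.isPrefixOf ['/'] (c :: t) = false := by
          simp [List.isPrefixOf]
          exact fun hcc => absurd hcc.symm hc
        simp only [hpre, Bool.false_eq_true, if_false]
        rw [ih t (c :: cur) acc (by simpa using h)]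
        simp only [pvSplit, if_neg hc]
        obtain ⟨x, xs, hx⟩ := List.exists_cons_of_ne_nil (pvSplit_ne_nil t)
        simp [hx, List.modifyHead]

theorem pvSplitOn_eq (l : List Char) : PySem.Chars.splitOn l ['/'] = pvSplit l := by
  rw [PySem.Chars.splitOn, pvSplitOn_go (l.length + 1) l [] [] (by omega)]
  obtain ⟨x, xs, hx⟩ := List.exists_cons_of_ne_nil (pvSplit_ne_nil l)
  simp [hx, List.modifyHead]

theorem pvInfix_singleton {c : Char} {l : List Char} : [c] <:+: l ↔ c ∈ l := by
  constructor
  · intro h; exact (List.singleton_sublist).mp h.sublist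
  · intro h
    obtain ⟨s, t, rfl⟩ := List.append_of_mem h
    exact ⟨s, t, by simp⟩

theorem pvSplit_no_slash {l : List Char} (h : '/' ∉ l) : pvSplit l = [l] := by
  induction l with
  | nil => simp [pvSplit]
  | cons c t ih =>
    simp only [List.mem_cons, not_or] at h
    simp [pvSplit, Ne.symm h.1, ih h.2, List.modifyHead]

theorem pvSplit_append {a : List Char} (b : List Char) (h : '/' ∉ a) :
    pvSplit (a ++ '/' :: b) = a :: pvSplit b := by
  induction a with
  | nil => simp [pvSplit]
  | cons c t ih =>
    simp only [List.mem_cons, not_or] at h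
    have := ih h.2
    simp only [List.cons_append, pvSplit, if_neg (Ne.symm h.1), this]
    obtain ⟨x, xs, hx⟩ := List.exists_cons_of_ne_nil (pvSplit_ne_nil (t ++ '/' :: b))
    simp [List.modifyHead]

-- decomposition of a string at its first '/' as pvSplit sees it
theorem pvFind_neg (l : List Char) (h : PySem.Chars.find l ['/'] < 0) :
    '/' ∉ l ∧ pvSplit l = [l] := by
  have : ¬ (['/'] <:+: l) := by
    rw [← PySem.Chars.find_nonneg_iff]; omega
  have hm : '/' ∉ l := fun hm => this (pvInfix_singleton.mpr hm)
  exact ⟨hm, pvSplit_no_slash hm⟩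

theorem pvFind_pos (l : List Char) (h : 0 ≤ PySem.Chars.find l ['/']) :
    '/' ∉ l.take (PySem.Chars.find l ['/']).toNat ∧
    l = l.take (PySem.Chars.find l ['/']).toNat
        ++ '/' :: l.drop ((PySem.Chars.find l ['/']).toNat + 1) := by
  obtain ⟨hpre, hmin⟩ := PySem.Chars.find_spec h
  set n := (PySem.Chars.find l ['/']).toNat with hn
  have hdrop : l.drop n = '/' :: l.drop (n + 1) := by
    obtain ⟨t, ht⟩ := hpre
    have h1 : l.drop (n + 1) = (l.drop n).drop 1 := by
      rw [List.drop_drop]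
    rw [h1, ← ht]
    simp
  have hnotake : '/' ∉ l.take n := by
    intro hmem
    obtain ⟨i, hi, hgi⟩ := List.mem_iff_getElem.mp hmem
    have hlt : i < n ∧ i < l.length := by
      constructor
      · have := List.length_take_le n l
        have h2 : i < (l.take n).length := hi
        simp at h2
        omega
      · have h2 : i < (l.take n).length := hi
        simp at h2
        omega
    apply hmin i hlt.1
    refine ⟨l.drop (i + 1), ?_⟩
    have hd : l.drop i = l[i] :: l.drop (i + 1) := List.drop_eq_getElem_cons hlt.2
    have hgi' : l[i] = '/' := by
      rw [← List.getElem_take (xs := l) (j := n) (h := hi)]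
      exact hgi
    rw [hd, hgi']
    simp
  refine ⟨hnotake, ?_⟩
  conv_lhs => rw [← List.take_append_drop n l]
  rw [hdrop]

-- the loop body of B restated on the split lists
def pvCombine : List (List Char) → List (List Char) → List String → Bool × Option (List String)
  | p :: ps, u :: us, acc =>
      if p ≠ ['*'] ∧ p ≠ u then (false, none)
      else
        let acc' := if p = ['*'] then acc ++ [String.mk u] else acc
        match ps, us with
        | [], [] => (true, some acc')
        | [], _ :: _ => (false, none)
        | _ :: _, [] => (false, none)
        | _ :: _, _ :: _ => pvCombine ps us acc'
  | _, _, _ => (false, none)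

theorem pvLoopA_cons (p u : List Char) (rest : List (List Char × List Char))
    (acc : List String) :
    pvLoopA ((p, u) :: rest) acc
      = if p = ['*'] then pvLoopA rest (acc ++ [String.mk u])
        else if p ≠ u then (false, none) else pvLoopA rest acc := rfl

set_option maxHeartbeats 1000000 in
theorem pvWalkB_eq_combine (pat u : List Char) (acc : List String) :
    pvWalkB pat u acc = pvCombine (pvSplit pat) (pvSplit u) acc := by
  induction hn : pat.length using Nat.strong_induction_on generalizing pat u acc with
  | _ n ih =>
  subst hn
  rw [pvWalkB]
  by_cases hi : PySem.Chars.find pat ['/'] < 0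
  · have ⟨hpm, hps⟩ := pvFind_neg pat hi
    by_cases hj : PySem.Chars.find u ['/'] < 0
    · have ⟨hum, hus⟩ := pvFind_neg u hj
      simp only [if_pos hi, if_pos hj, hps, hus, pvCombine]
      split
      · rfl
      · simp [hi, hj]
    · have hj' : 0 ≤ PySem.Chars.find u ['/'] := by omega
      have ⟨hu1, hu2⟩ := pvFind_pos u hj'
      have hus : pvSplit u
          = u.take (PySem.Chars.find u ['/']).toNat
            :: pvSplit (u.drop ((PySem.Chars.find u ['/']).toNat + 1)) := by
        conv_lhs => rw [hu2]
        exact pvSplit_append _ hu1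
      simp only [if_pos hi, if_neg hj, hps, hus,
        PySem.List.slice_to u hj', pvCombine]
      split
      · rfl
      · rcases h : pvSplit (u.drop ((PySem.Chars.find u ['/']).toNat + 1)) with _ | ⟨b, bs⟩
        · exact absurd h (pvSplit_ne_nil _)
        · simp [hi, hj]
  · have hi' : 0 ≤ PySem.Chars.find pat ['/'] := by omega
    have ⟨hp1, hp2⟩ := pvFind_pos pat hi'
    have hps : pvSplit pat
        = pat.take (PySem.Chars.find pat ['/']).toNat
          :: pvSplit (pat.drop ((PySem.Chars.find pat ['/']).toNat + 1)) := by
      conv_lhs => rw [hp2]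
      exact pvSplit_append _ hp1
    by_cases hj : PySem.Chars.find u ['/'] < 0
    · have ⟨hum, hus⟩ := pvFind_neg u hj
      simp only [if_neg hi, if_pos hj, hps, hus,
        PySem.List.slice_to pat hi', pvCombine]
      split
      · rfl
      · rcases h : pvSplit (pat.drop ((PySem.Chars.find pat ['/']).toNat + 1)) with _ | ⟨a, as'⟩
        · exact absurd h (pvSplit_ne_nil _)
        · simp [hi, hj]
    · have hj' : 0 ≤ PySem.Chars.find u ['/'] := by omega
      have ⟨hu1, hu2⟩ := pvFind_pos u hj'
      have hus : pvSplit u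
          = u.take (PySem.Chars.find u ['/']).toNat
            :: pvSplit (u.drop ((PySem.Chars.find u ['/']).toNat + 1)) := by
        conv_lhs => rw [hu2]
        exact pvSplit_append _ hu1
      have hlen : (PySem.List.slice pat (some (PySem.Chars.find pat ['/'] + 1)) none).length
          < pat.length := by
        rw [PySem.List.slice_from _ (by omega)]
        have hne : pat ≠ [] := by
          rintro rfl
          have : ¬ (['/'] <:+: ([] : List Char)) := by
            intro hh; simpa using List.eq_nil_of_infix_nil hh
          rw [← PySem.Chars.find_nonneg_iff] at this
          omega
        have hlpos : 0 < pat.length := List.length_pos_iff.mpr hne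
        simp only [List.length_drop]
        omega
      simp only [if_neg hi, if_neg hj, hps, hus,
        PySem.List.slice_to pat hi', PySem.List.slice_to u hj', pvCombine]
      split
      · rfl
      · simp only [hi, hj, and_self, if_false, or_self]
        rw [ih _ hlen _ _ _ rfl]
        rw [PySem.List.slice_from _ (show (0:Int) ≤ PySem.Chars.find pat ['/'] + 1 by omega),
            PySem.List.slice_from _ (show (0:Int) ≤ PySem.Chars.find u ['/'] + 1 by omega)]
        have e1 : (PySem.Chars.find pat ['/'] + 1).toNat
            = (PySem.Chars.find pat ['/']).toNat + 1 := by omega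
        have e2 : (PySem.Chars.find u ['/'] + 1).toNat
            = (PySem.Chars.find u ['/']).toNat + 1 := by omega
        rw [e1, e2]
        rcases hA : pvSplit (pat.drop ((PySem.Chars.find pat ['/']).toNat + 1)) with _ | ⟨a, as'⟩
        · exact absurd hA (pvSplit_ne_nil _)
        rcases hB : pvSplit (u.drop ((PySem.Chars.find u ['/']).toNat + 1)) with _ | ⟨b, bs⟩
        · exact absurd hB (pvSplit_ne_nil _)
        simp [pvCombine]

theorem pvCombine_eq_loopA (pp uu : List (List Char)) (acc : List String)
    (hp : pp ≠ []) (hu : uu ≠ []) :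
    pvCombine pp uu acc
      = if pp.length ≠ uu.length then (false, none) else pvLoopA (pp.zip uu) acc := by
  induction pp generalizing uu acc with
  | nil => exact absurd rfl hp
  | cons p ps ih =>
    rcases uu with _ | ⟨u, us⟩
    · exact absurd rfl hu
    rw [pvCombine, List.zip_cons_cons]
    by_cases hfail : p ≠ ['*'] ∧ p ≠ u
    · rw [if_pos hfail]
      by_cases hlen : (p :: ps).length = (u :: us).length
      · rw [if_neg (by simp [hlen]), pvLoopA_cons, if_neg hfail.1, if_pos hfail.2]
      · rw [if_pos hlen]
    · rw [if_neg hfail]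
      push_neg at hfail
      have hstep : pvLoopA ((p, u) :: ps.zip us) acc
          = pvLoopA (ps.zip us) (if p = ['*'] then acc ++ [String.mk u] else acc) := by
        rw [pvLoopA_cons]
        by_cases hstar : p = ['*']
        · rw [if_pos hstar, if_pos hstar]
        · rw [if_neg hstar, if_neg hstar, if_neg (by simp [hfail hstar])]
      rcases ps with _ | ⟨a, as'⟩ <;> rcases us with _ | ⟨b, bs⟩
      · have hc : ¬(([p] : List (List Char)).length ≠ ([u] : List (List Char)).length) := by
          simp
        rw [if_neg hc, hstep]
        rfl
      · have hc : ([p] : List (List Char)).length ≠ (u :: b :: bs).length := by simp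
        rw [if_pos hc]
      · have hc : (p :: a :: as').length ≠ ([u] : List (List Char)).length := by simp
        rw [if_pos hc]
      · dsimp only
        rw [ih (b :: bs) (if p = ['*'] then acc ++ [String.mk u] else acc)
              (by simp) (by simp),
            hstep]
        by_cases hlen : as'.length = bs.length
        · have h1 : ¬((a :: as').length ≠ (b :: bs).length) := by
            simp only [List.length_cons]; omega
          have h2 : ¬((p :: a :: as').length ≠ (u :: b :: bs).length) := by
            simp only [List.length_cons]; omega
          rw [if_neg h1, if_neg h2]
        · have h1 : (a :: as').length ≠ (b :: bs).length := by
            simp only [List.length_cons]; omega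
          have h2 : (p :: a :: as').length ≠ (u :: b :: bs).length := by
            simp only [List.length_cons]; omega
          rw [if_pos h1, if_pos h2]

-- ===== VERDICT (by name: the statement is the Claim_ definition above) =====
theorem matchespattern_spec : Claim_equal_matchespattern := by
  intro pattern url _ _
  unfold Spec_matchespattern matchespattern matchespattern_alt
  cases hp : pvNormalize? pattern with
  | none => cases hu : pvNormalize? url <;> rfl
  | some p =>
    cases hu : pvNormalize? url with
    | none => rfl
    | some u =>
      dsimp only
      rw [pvSplitOn_eq, pvSplitOn_eq, pvWalkB_eq_combine,
          pvCombine_eq_loopA _ _ _ (pvSplit_ne_nil _) (pvSplit_ne_nil _)]
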